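-- pv_equiv track=rewrite | github.com/pai10756/agent-team-4seasonquiet | scripts/gen_character_card.py | build_outfit_block
-- ===== SOURCE A (Python) =====
-- def build_outfit_block(char: dict) -> str:
--     """Build OUTFIT text from wardrobe.primary or first wardrobe entry."""
--     wardrobe = char.get("wardrobe", {})
--     # Try keys in priority order
--     for key_suffix in ("primary", "ep_primary"):
--         for wk, wv in wardrobe.items():
--             if key_suffix in wk and isinstance(wv, dict):
--                 return _format_outfit(wv)
--     # Fallback: first entry
--     for wk, wv in wardrobe.items():
--         if isinstance(wv, dict) and "alternate" not in wk:
--             return _format_outfit(wv)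
--     # Last resort
--     for wk, wv in wardrobe.items():
--         if isinstance(wv, dict):
--             return _format_outfit(wv)
--     return "- Casual, clean outfit matching brand palette"
--
-- def _format_outfit(outfit: dict) -> str:
--     lines = []
--     desc = outfit.get("description", "")
--     color = outfit.get("color", "")
--     material = outfit.get("material", "")
--     fit = outfit.get("fit", "")
--     accessories = outfit.get("accessories", "")
--
--     main = desc
--     if color and color not in desc:
--         main += f" ({color})"
--     if material:
--         main += f", {material}"
--     if fit:
--         main += f", {fit}"
--     lines.append(f"- {main}")
--
--     if accessories:
--         lines.append(f"- {accessories}")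
--     lines.append("- Bare feet (for full body shots)")
--     return "\n".join(lines)
-- ===== SOURCE B (Python) =====
-- def build_outfit_block(char: dict) -> str:
--     """Build OUTFIT text from wardrobe.primary or first wardrobe entry."""
--     wardrobe = char.get("wardrobe", {})
--     # One pass: keep the FIRST dict-valued entry of each priority tier.
--     tiers = [None, None, None]
--     for wk, wv in wardrobe.items():
--         if isinstance(wv, dict):
--             t = 0 if "primary" in wk else (1 if "alternate" not in wk else 2)
--             if tiers[t] is None:
--                 tiers[t] = wv
--     for wv in tiers:
--         if wv is not None:
--             return _format_outfit(wv)
--     return "- Casual, clean outfit matching brand palette"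
--
-- def _format_outfit(outfit: dict) -> str:
--     desc = outfit.get("description", "")
--     color = outfit.get("color", "")
--     base = desc + (f" ({color})" if color and color not in desc else "")
--     main = ", ".join([base] + [p for p in (outfit.get("material", ""), outfit.get("fit", "")) if p])
--     lines = [f"- {main}"]
--     accessories = outfit.get("accessories", "")
--     if accessories:
--         lines.append(f"- {accessories}")
--     lines.append("- Bare feet (for full body shots)")
--     return "\n".join(lines)
-- ===== Notes on version B (the rewrite author's own statement) =====
-- stated objective: simpler
-- what changed: Replaces A's three sequential early-returning scans of the wardrobe with a single pass that keeps the first dict-valued entry of each priority tier and then formats the best tier, and replaces _format_outfit's chained conditional appends with a join over filtered parts.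
import Mathlib
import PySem

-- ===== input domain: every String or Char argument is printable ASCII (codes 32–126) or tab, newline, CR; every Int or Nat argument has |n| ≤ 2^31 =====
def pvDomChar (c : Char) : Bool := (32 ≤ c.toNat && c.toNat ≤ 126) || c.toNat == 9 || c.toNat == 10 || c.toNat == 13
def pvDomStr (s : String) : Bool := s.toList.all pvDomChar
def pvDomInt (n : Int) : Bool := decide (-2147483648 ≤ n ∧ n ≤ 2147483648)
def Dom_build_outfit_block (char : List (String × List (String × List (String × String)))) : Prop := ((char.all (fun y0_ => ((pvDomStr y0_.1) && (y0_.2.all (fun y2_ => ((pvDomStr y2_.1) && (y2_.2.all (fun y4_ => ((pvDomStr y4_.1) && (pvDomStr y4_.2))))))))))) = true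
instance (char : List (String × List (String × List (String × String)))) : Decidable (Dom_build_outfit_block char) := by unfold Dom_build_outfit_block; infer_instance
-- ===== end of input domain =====

-- B replaces A's three sequential early-returning scans of the wardrobe with one pass that
-- keeps the first entry of each priority tier, and _format_outfit's chained conditional
-- appends with a join over filtered parts: objective 'simpler'.

-- ===== PORT A =====
-- _format_outfit. (Under the Lean type every wardrobe value is a dict, so Python's
-- 'isinstance(wv, dict)' is always true and is omitted in both ports.)
def pvFormatOutfit (outfit : List (String × String)) : String :=
  let desc := PySem.Dict.getD ⟨outfit⟩ "description" ""
  let color := PySem.Dict.getD ⟨outfit⟩ "color" ""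
  let material := PySem.Dict.getD ⟨outfit⟩ "material" ""
  let fit := PySem.Dict.getD ⟨outfit⟩ "fit" ""
  let accessories := PySem.Dict.getD ⟨outfit⟩ "accessories" ""
  let main := desc
  let main := if color ≠ "" ∧ PySem.Str.isIn color desc = false then main ++ " (" ++ color ++ ")" else main
  let main := if material ≠ "" then main ++ ", " ++ material else main
  let main := if fit ≠ "" then main ++ ", " ++ fit else main
  let lines := ["- " ++ main]
  let lines := if accessories ≠ "" then lines ++ ["- " ++ accessories] else lines
  let lines := lines ++ ["- Bare feet (for full body shots)"]
  PySem.Str.join "\n" lines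

def build_outfit_block (char : List (String × List (String × List (String × String)))) : String :=
  let wardrobe := PySem.Dict.getD ⟨char⟩ "wardrobe" []
  -- for key_suffix in ("primary", "ep_primary"): for wk, wv in wardrobe.items(): early return
  match ["primary", "ep_primary"].findSome? (fun suffix =>
      (wardrobe.find? (fun p => PySem.Str.isIn suffix p.1)).map (fun p => pvFormatOutfit p.2)) with
  | some s => s
  | none =>
    match wardrobe.find? (fun p => !PySem.Str.isIn "alternate" p.1) with
    | some p => pvFormatOutfit p.2
    | none =>
      match wardrobe.find? (fun _ => true) with
      | some p => pvFormatOutfit p.2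
      | none => "- Casual, clean outfit matching brand palette"

-- ===== PORT B =====
def pvFormatOutfitAlt (outfit : List (String × String)) : String :=
  let desc := PySem.Dict.getD ⟨outfit⟩ "description" ""
  let color := PySem.Dict.getD ⟨outfit⟩ "color" ""
  let base := desc ++ (if color ≠ "" ∧ PySem.Str.isIn color desc = false then " (" ++ color ++ ")" else "")
  let main := PySem.Str.join ", "
      ([base] ++ ([PySem.Dict.getD ⟨outfit⟩ "material" "", PySem.Dict.getD ⟨outfit⟩ "fit" ""].filter (· ≠ "")))
  let accessories := PySem.Dict.getD ⟨outfit⟩ "accessories" ""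
  let lines := ["- " ++ main] ++ (if accessories ≠ "" then ["- " ++ accessories] else [])
      ++ ["- Bare feet (for full body shots)"]
  PySem.Str.join "\n" lines

-- tier of a wardrobe key: 0 = contains "primary", 1 = no "alternate", 2 = rest
def pvTier (wk : String) : Nat :=
  if PySem.Str.isIn "primary" wk then 0 else if !PySem.Str.isIn "alternate" wk then 1 else 2

-- keep the FIRST entry seen in each tier
def pvStep (t : Option (List (String × String)) × Option (List (String × String)) × Option (List (String × String)))
    (p : String × List (String × String)) :
    Option (List (String × String)) × Option (List (String × String)) × Option (List (String × String)) :=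
  match pvTier p.1, t with
  | 0, (none, b, c) => (some p.2, b, c)
  | 1, (a, none, c) => (a, some p.2, c)
  | 2, (a, b, none) => (a, b, some p.2)
  | _, t => t

def build_outfit_block_alt (char : List (String × List (String × List (String × String)))) : String :=
  let wardrobe := PySem.Dict.getD ⟨char⟩ "wardrobe" []
  match wardrobe.foldl pvStep (none, none, none) with
  | (some wv, _, _) => pvFormatOutfitAlt wv
  | (none, some wv, _) => pvFormatOutfitAlt wv
  | (none, none, some wv) => pvFormatOutfitAlt wv
  | (none, none, none) => "- Casual, clean outfit matching brand palette"

-- ===== PRECONDITION & SPEC =====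
def Spec_build_outfit_block (char : List (String × List (String × List (String × String)))) (out : String) : Prop := out = build_outfit_block_alt char
instance (char : List (String × List (String × List (String × String)))) (out : String) : Decidable (Spec_build_outfit_block char out) := by unfold Spec_build_outfit_block; infer_instance

-- ===== CLAIM (what is proved, stated in full; the proofs are below) =====
def Claim_equal_build_outfit_block : Prop := ∀ (char : List (String × List (String × List (String × String)))), Dom_build_outfit_block char → Spec_build_outfit_block char (build_outfit_block char)

-- ===== LEMMAS AND PROOFS =====

theorem pv_join_singleton (s a : String) : PySem.Str.join s [a] = a := by
  simp [PySem.Str.join, PySem.Chars.join, List.intercalate]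

theorem pv_join_cons_cons (s a b : String) (l : List String) :
    PySem.Str.join s (a :: b :: l) = a ++ s ++ PySem.Str.join s (b :: l) := by
  simp [PySem.Str.join, PySem.Chars.join, List.intercalate, String.append_assoc]

theorem pv_fmt_eq (o : List (String × String)) : pvFormatOutfit o = pvFormatOutfitAlt o := by
  unfold pvFormatOutfit pvFormatOutfitAlt
  by_cases hm : PySem.Dict.getD (⟨o⟩ : PySem.Dict String String) "material" "" = "" <;>
    by_cases hf : PySem.Dict.getD (⟨o⟩ : PySem.Dict String String) "fit" "" = "" <;>
      by_cases ha : PySem.Dict.getD (⟨o⟩ : PySem.Dict String String) "accessories" "" = "" <;>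
        simp [hm, hf, ha, pv_join_singleton, pv_join_cons_cons, String.append_assoc] <;>
          split_ifs <;> simp [String.append_assoc]

theorem pv_foldl_pvStep (l : List (String × List (String × String)))
    (a b c : Option (List (String × String))) :
    l.foldl pvStep (a, b, c) =
      (a.or ((l.find? (fun p => PySem.Str.isIn "primary" p.1)).map (·.2)),
       b.or ((l.find? (fun p => !PySem.Str.isIn "primary" p.1 && !PySem.Str.isIn "alternate" p.1)).map (·.2)),
       c.or ((l.find? (fun p => !PySem.Str.isIn "primary" p.1 && PySem.Str.isIn "alternate" p.1)).map (·.2))) := by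
  induction l generalizing a b c with
  | nil => simp
  | cons x xs ih =>
    rw [List.foldl_cons]
    by_cases h0 : PySem.Str.isIn "primary" x.1
    · have ht : pvTier x.1 = 0 := by unfold pvTier; rw [if_pos h0]
      have hstep : pvStep (a, b, c) x = (a.or (some x.2), b, c) := by
        unfold pvStep; rw [ht]; cases a <;> rfl
      rw [hstep, ih]
      simp only [List.find?_cons, h0, Bool.not_true, Bool.false_and, Option.map_some,
        Option.or_assoc, Option.some_or]
    · have h0' : PySem.Str.isIn "primary" x.1 = false := by
        revert h0; cases PySem.Str.isIn "primary" x.1 <;> simp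
      by_cases h1 : PySem.Str.isIn "alternate" x.1
      · have ht : pvTier x.1 = 2 := by unfold pvTier; rw [if_neg h0, h1]; rfl
        have hstep : pvStep (a, b, c) x = (a, b, c.or (some x.2)) := by
          unfold pvStep; rw [ht]; cases c <;> rfl
        rw [hstep, ih]
        simp only [List.find?_cons, h0', h1, Bool.not_false, Bool.not_true,
          Bool.and_false, Bool.and_true, Option.map_some, Option.or_assoc, Option.some_or]
      · have h1' : PySem.Str.isIn "alternate" x.1 = false := by
          revert h1; cases PySem.Str.isIn "alternate" x.1 <;> simp
        have ht : pvTier x.1 = 1 := by unfold pvTier; rw [if_neg h0, h1']; rfl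
        have hstep : pvStep (a, b, c) x = (a, b.or (some x.2), c) := by
          unfold pvStep; rw [ht]; cases b <;> rfl
        rw [hstep, ih]
        simp only [List.find?_cons, h0', h1', Bool.not_false, Bool.true_and, Bool.and_false,
          Option.map_some, Option.or_assoc, Option.some_or]

theorem pv_find?_congr {α : Type} {l : List α} {p q : α → Bool}
    (h : ∀ x ∈ l, p x = q x) : l.find? p = l.find? q := by
  induction l with
  | nil => rfl
  | cons x xs ih =>
    simp only [List.find?_cons, h x (by simp)]
    cases q x with
    | true => rfl
    | false => exact ih (fun y hy => h y (by simp [hy]))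

theorem pv_ep_primary_sub {wk : String} (h : PySem.Str.isIn "ep_primary" wk = true) :
    PySem.Str.isIn "primary" wk = true := by
  rw [PySem.Str.isIn_iff_infix] at h ⊢
  exact List.IsInfix.trans (by decide) h

-- ===== VERDICT (by name: the statement is the Claim_ definition above) =====
theorem build_outfit_block_spec : Claim_equal_build_outfit_block := by
  intro char _
  unfold Spec_build_outfit_block build_outfit_block build_outfit_block_alt
  simp only []
  rw [pv_foldl_pvStep]
  simp only [Option.none_or]
  set w := PySem.Dict.getD (⟨char⟩ : PySem.Dict String (List (String × List (String × String)))) "wardrobe" [] with hw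
  cases h0 : w.find? (fun p => PySem.Str.isIn "primary" p.1) with
  | some p =>
    simp only [List.findSome?_cons, h0, Option.map_some]
    exact pv_fmt_eq p.2
  | none =>
    have hall0 : ∀ p ∈ w, PySem.Str.isIn "primary" p.1 = false := by
      intro p hp
      have h := List.find?_eq_none.mp h0 p hp
      revert h; cases PySem.Str.isIn "primary" p.1 <;> simp
    have hep : w.find? (fun p => PySem.Str.isIn "ep_primary" p.1) = none := by
      apply List.find?_eq_none.mpr
      intro p hp hcon
      have h := pv_ep_primary_sub (by simpa using hcon)
      rw [hall0 p hp] at h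
      cases h
    have h1eq : w.find? (fun p => !PySem.Str.isIn "primary" p.1 && !PySem.Str.isIn "alternate" p.1)
        = w.find? (fun p => !PySem.Str.isIn "alternate" p.1) := by
      apply pv_find?_congr
      intro p hp
      rw [hall0 p hp, Bool.not_false, Bool.true_and]
    simp only [List.findSome?_cons, h0, Option.map_none, List.findSome?_nil, hep, h1eq]
    cases h1 : w.find? (fun p => !PySem.Str.isIn "alternate" p.1) with
    | some p => exact pv_fmt_eq p.2
    | none =>
      have hall1 : ∀ p ∈ w, PySem.Str.isIn "alternate" p.1 = true := by
        intro p hp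
        have h := List.find?_eq_none.mp h1 p hp
        revert h; cases PySem.Str.isIn "alternate" p.1 <;> simp
      have h2eq : w.find? (fun p => !PySem.Str.isIn "primary" p.1 && PySem.Str.isIn "alternate" p.1)
          = w.find? (fun (_ : String × List (String × String)) => true) := by
        apply pv_find?_congr
        intro p hp
        rw [hall0 p hp, hall1 p hp, Bool.not_false, Bool.true_and]
      rw [h2eq]
      cases h2 : w.find? (fun (_ : String × List (String × String)) => true) with
      | some p => exact pv_fmt_eq p.2
      | none => rfl
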